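-- pv_equiv track=rewrite | github.com/robotnamedEmily/itp-w1-highest-number-cubed | highest_number_cubed/main.py | highest_number_cubed
-- ===== SOURCE A (Python) =====
-- def highest_number_cubed(limit):
--     num_list = []
--     num = 0
--     while num < limit:
--         if num ** 3 < limit:
--             num_list.append(num)
--         num += 1
--     return max(num_list)
-- ===== SOURCE B (Python) =====
-- def highest_number_cubed(limit):
--     # largest n >= 0 with n**3 < limit, by exponential growth + binary search
--     lo, hi = 0, 1
--     while hi ** 3 < limit:
--         hi *= 2
--     while lo + 1 < hi:
--         mid = (lo + hi) // 2
--         if mid ** 3 < limit: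
--             lo = mid
--         else:
--             hi = mid
--     return lo
-- ===== Notes on version B (the rewrite author's own statement) =====
-- stated objective: faster
-- what changed: Replaces A's linear scan of all numbers below limit with an exponential-growth bracket plus binary search for the largest n whose cube is below limit.
-- outside the precondition, e.g. on highest_number_cubed(0): A raises ValueError, B returns 0
import Mathlib
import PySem

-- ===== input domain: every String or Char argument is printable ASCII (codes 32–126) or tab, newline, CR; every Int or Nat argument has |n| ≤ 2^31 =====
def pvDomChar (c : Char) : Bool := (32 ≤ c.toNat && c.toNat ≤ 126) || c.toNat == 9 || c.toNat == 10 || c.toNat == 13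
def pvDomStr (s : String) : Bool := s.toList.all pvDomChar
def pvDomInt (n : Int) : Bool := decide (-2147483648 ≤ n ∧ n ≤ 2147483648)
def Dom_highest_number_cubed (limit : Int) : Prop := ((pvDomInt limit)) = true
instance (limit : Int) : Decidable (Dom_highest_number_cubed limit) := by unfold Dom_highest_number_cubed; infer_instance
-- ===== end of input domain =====

-- B replaces A's linear scan below `limit` with exponential bracketing + binary search
-- for the largest nonnegative n whose cube is below limit (measured faster by the check).
-- For limit ≤ 0, A raises ValueError (max of an empty list): excluded by Pre_.


-- ===== PORT A =====
-- the while loop: appends num when its cube is below limit, then num += 1, while num < limit.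
-- fuel is a pure totality guard ((limit - num).toNat steps remain; never exhausted at the call)
def pvAloop (fuel : Nat) (limit num : Int) (acc : List Int) : List Int :=
  match fuel with
  | 0 => acc
  | f + 1 =>
    if num < limit then
      pvAloop f limit (num + 1) (if num ^ 3 < limit then acc ++ [num] else acc)
    else acc

def highest_number_cubed (limit : Int) : Int :=
  ((PySem.List.max? (pvAloop limit.toNat limit 0 []) (fun x => x)).getD 0)  -- max([]) raises: excluded by Pre_

-- ===== PORT B =====
-- first while loop of Source B: double hi while its cube is below limit (the 1 ≤ hi conjunct and the
-- fuel are pure totality guards; neither fires on an actual run)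
def pvGrow (fuel : Nat) (limit hi : Int) : Int :=
  match fuel with
  | 0 => hi
  | f + 1 => if 1 ≤ hi ∧ hi ^ 3 < limit then pvGrow f limit (hi * 2) else hi

-- second while loop of Source B: binary search on (lo, hi); fuel is a pure totality guard
def pvBS (fuel : Nat) (limit lo hi : Int) : Int :=
  match fuel with
  | 0 => lo
  | f + 1 =>
    if lo + 1 < hi then
      if (PySem.Int.floordiv (lo + hi) 2) ^ 3 < limit then
        pvBS f limit (PySem.Int.floordiv (lo + hi) 2) hi
      else
        pvBS f limit lo (PySem.Int.floordiv (lo + hi) 2)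
    else lo

def highest_number_cubed_alt (limit : Int) : Int :=
  pvBS (pvGrow limit.toNat limit 1).toNat limit 0 (pvGrow limit.toNat limit 1)

-- ===== PRECONDITION & SPEC =====
-- Pre_ excludes limit ≤ 0, where Python A raises ValueError (max of an empty list).
def Pre_highest_number_cubed (limit : Int) : Prop := 1 ≤ limit
instance (limit : Int) : Decidable (Pre_highest_number_cubed limit) := by unfold Pre_highest_number_cubed; infer_instance
def pvWitness_highest_number_cubed : Int := 10

def Spec_highest_number_cubed (limit : Int) (out : Int) : Prop := out = highest_number_cubed_alt limit
instance (limit : Int) (out : Int) : Decidable (Spec_highest_number_cubed limit out) := by unfold Spec_highest_number_cubed; infer_instance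

-- ===== CLAIM (what is proved, stated in full; the proofs are below) =====
def Claim_equal_highest_number_cubed : Prop := ∀ (limit : Int), Dom_highest_number_cubed limit → Pre_highest_number_cubed limit → Spec_highest_number_cubed limit (highest_number_cubed limit)

-- ===== LEMMAS AND PROOFS =====

-- r is the answer: the largest nonnegative integer whose cube is below limit
def PvAns (limit r : Int) : Prop := 0 ≤ r ∧ r ^ 3 < limit ∧ limit ≤ (r + 1) ^ 3

theorem pv_cube_le {a b : Int} (ha : 0 ≤ a) (hab : a ≤ b) : a ^ 3 ≤ b ^ 3 := by
  nlinarith [ha, hab, sq_nonneg a, sq_nonneg b, sq_nonneg (a + b)]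

theorem pv_self_le_cube {hi : Int} (h : 1 ≤ hi) : hi ≤ hi ^ 3 := by
  have a : (0:Int) ≤ hi - 1 := by linarith
  have b : (0:Int) ≤ hi := by linarith
  have c : (0:Int) ≤ hi + 1 := by linarith
  have := mul_nonneg (mul_nonneg a b) c
  nlinarith [this]

theorem pv_midf (lo hi : Int) (h : lo + 1 < hi) :
    lo < PySem.Int.floordiv (lo + hi) 2 ∧ PySem.Int.floordiv (lo + hi) 2 < hi := by
  have hm : PySem.Int.floordiv (lo + hi) 2 = (lo + hi) / 2 :=
    PySem.Int.floordiv_eq_ediv_of_pos (by omega)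
  rw [hm]
  omega

theorem pvGrow_spec (limit : Int) : ∀ (fuel : Nat) (hi : Int), 1 ≤ hi →
    (limit - hi).toNat ≤ fuel → 1 ≤ pvGrow fuel limit hi ∧ limit ≤ (pvGrow fuel limit hi) ^ 3 := by
  intro fuel
  induction fuel with
  | zero =>
      intro hi h1 hf
      have := pv_self_le_cube h1
      exact ⟨h1, by simp [pvGrow]; omega⟩
  | succ f ih =>
      intro hi h1 hf
      rw [pvGrow]
      split
      · rename_i h
        have := pv_self_le_cube h1
        exact ih (hi * 2) (by omega) (by omega)
      · rename_i h
        exact ⟨h1, by omega⟩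

theorem pvBS_spec (limit : Int) : ∀ (fuel : Nat) (lo hi : Int), (hi - lo).toNat ≤ fuel →
    0 ≤ lo → lo < hi → lo ^ 3 < limit → limit ≤ hi ^ 3 →
    PvAns limit (pvBS fuel limit lo hi) := by
  intro fuel
  induction fuel with
  | zero =>
      intro lo hi hf h0 hlh hlo hhi
      omega
  | succ f ih =>
      intro lo hi hf h0 hlh hlo hhi
      rw [pvBS]
      split
      · rename_i h
        have hmid := pv_midf lo hi h
        split
        · rename_i hc
          exact ih _ hi (by omega) (by omega) (by omega) hc hhi
        · rename_i hc
          exact ih lo _ (by omega) h0 (by omega) hlo (by omega)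
      · rename_i h
        have : hi = lo + 1 := by omega
        exact ⟨h0, hlo, by rw [this] at hhi; exact hhi⟩

theorem pvB_correct (limit : Int) (h : 1 ≤ limit) :
    PvAns limit (highest_number_cubed_alt limit) := by
  obtain ⟨hg1, hg2⟩ := pvGrow_spec limit limit.toNat 1 le_rfl (by omega)
  exact pvBS_spec limit _ 0 _ (by omega) le_rfl (by omega) (by omega) hg2

-- members of acc are preserved by the loop
theorem pvAloop_acc_mono (limit : Int) : ∀ (fuel : Nat) (num : Int) (acc : List Int) (x : Int),
    x ∈ acc → x ∈ pvAloop fuel limit num acc := by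
  intro fuel
  induction fuel with
  | zero => intro num acc x hx; exact hx
  | succ f ih =>
      intro num acc x hx
      rw [pvAloop]
      split
      · apply ih
        split
        · exact List.mem_append_left _ hx
        · exact hx
      · exact hx

-- every member of the loop's output came from acc or is a nonneg number with cube below limit
theorem pvAloop_mem (limit : Int) : ∀ (fuel : Nat) (num : Int) (acc : List Int) (x : Int),
    0 ≤ num → x ∈ pvAloop fuel limit num acc → x ∈ acc ∨ (0 ≤ x ∧ x ^ 3 < limit) := by
  intro fuel
  induction fuel with
  | zero => intro num acc x _ hx; exact Or.inl hx
  | succ f ih =>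
      intro num acc x h0 hx
      rw [pvAloop] at hx
      split at hx
      · rcases ih (num + 1) _ x (by omega) hx with h | h
        · split at h
          · rcases List.mem_append.mp h with h' | h'
            · exact Or.inl h'
            · rename_i hc
              simp at h'
              exact Or.inr ⟨h' ▸ h0, h' ▸ hc⟩
          · exact Or.inl h
        · exact Or.inr h
      · exact Or.inl hx

-- r itself is collected once the loop reaches it (fuel covers the remaining distance)
theorem pvAloop_mem_ans (limit r : Int) (hP : PvAns limit r) :
    ∀ (fuel : Nat) (num : Int) (acc : List Int), (limit - num).toNat ≤ fuel →
    0 ≤ num → num ≤ r → r ∈ pvAloop fuel limit num acc := by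
  obtain ⟨hr0, hrc, hub⟩ := hP
  have hrlim : r < limit := by
    rcases eq_or_lt_of_le hr0 with h | h
    · rw [← h] at hrc ⊢
      simpa using hrc
    · have := pv_self_le_cube (by omega : (1:Int) ≤ r)
      omega
  intro fuel
  induction fuel with
  | zero => intro num acc hf h0 hr; omega
  | succ f ih =>
      intro num acc hf h0 hr
      rw [pvAloop]
      split
      · rcases eq_or_lt_of_le hr with heq | hlt
        · subst heq
          apply pvAloop_acc_mono
          simp [hrc]
        · exact ih (num + 1) _ (by omega) (by omega) (by omega)
      · omega

theorem pvA_eq_ans (limit r : Int) (hP : PvAns limit r) :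
    highest_number_cubed limit = r := by
  unfold highest_number_cubed
  have hrmem : r ∈ pvAloop limit.toNat limit 0 [] :=
    pvAloop_mem_ans limit r hP limit.toNat 0 [] (by omega) le_rfl hP.1
  cases hmax : PySem.List.max? (pvAloop limit.toNat limit 0 []) (fun x => x) with
  | none =>
      rw [PySem.List.max?_eq_none_iff] at hmax
      rw [hmax] at hrmem
      simp at hrmem
  | some m =>
      have hmmem := PySem.List.max?_mem hmax
      have hmle : m ≤ r := by
        rcases pvAloop_mem limit limit.toNat 0 [] m le_rfl hmmem with h | h
        · simp at h
        · by_contra hc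
          have hcube : (r + 1) ^ 3 ≤ m ^ 3 := pv_cube_le (by have := hP.1; omega) (by omega)
          have hub := hP.2.2
          omega
      have hrle : r ≤ m := PySem.List.max?_isMax hmax r hrmem
      simp
      omega

-- ===== VERDICT (by name: the statement is the Claim_ definition above) =====
theorem highest_number_cubed_spec : Claim_equal_highest_number_cubed := by
  intro limit _ hpre
  unfold Spec_highest_number_cubed
  exact pvA_eq_ans limit (highest_number_cubed_alt limit) (pvB_correct limit hpre)
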